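-- pv_equiv track=rewrite | github.com/teljoa/programacion | python/Tema2/Modular Programming II/boletin/boletin/ejercicio6.py | getNumberOfDigitsOctal
-- ===== SOURCE A (Python) =====
-- def getNumberOfDigitsOctal(cad):
--     cad = str(cad)
--     k=0
--     decimal = False
--     for n in range(len(cad)):
--         if cad[n] in '01234567':
--             k +=1
--         elif cad[n] == '.' and not decimal and (n != (len(cad)-1)) and (n != 0):
--             if (n == 1 and (cad [0] in '+-')):
--                 return None
--             else:
--                 decimal = True
--         elif (cad[n] == '+' or cad[n] == '-') and n == 0:
--             pass
--         else:
--             return None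
--     return k
-- ===== SOURCE B (Python) =====
-- import re
--
-- _OCTAL_RE = re.compile(r'[+-]?(?:[0-7]+(?:\.[0-7]+)?)?')
--
-- def getNumberOfDigitsOctal(cad):
--     cad = str(cad)
--     if _OCTAL_RE.fullmatch(cad) is None:
--         return None
--     return sum(1 for c in cad if c in '01234567')
-- ===== Notes on version B (the rewrite author's own statement) =====
-- stated objective: idiomatic
-- what changed: B validates the whole octal-number grammar in one re.fullmatch call and counts the octal digits in a separate pass, instead of A's single char-by-char loop tracking a decimal flag and position indices.
import Mathlib
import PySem

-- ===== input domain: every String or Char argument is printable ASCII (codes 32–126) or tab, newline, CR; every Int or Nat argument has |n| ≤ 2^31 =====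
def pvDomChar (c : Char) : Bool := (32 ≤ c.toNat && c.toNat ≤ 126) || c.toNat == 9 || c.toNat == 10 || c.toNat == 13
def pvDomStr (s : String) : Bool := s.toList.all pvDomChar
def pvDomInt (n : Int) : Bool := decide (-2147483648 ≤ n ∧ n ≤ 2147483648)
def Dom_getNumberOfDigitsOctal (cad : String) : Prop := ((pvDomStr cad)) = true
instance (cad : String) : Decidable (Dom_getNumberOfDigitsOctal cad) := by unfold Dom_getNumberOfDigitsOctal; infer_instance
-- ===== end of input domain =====

-- B validates the whole octal-number grammar in one shot (re.fullmatch in Python, a direct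
-- grammar decomposition in the port) and counts digits in a separate pass, instead of A's
-- char-by-char loop tracking a decimal flag and position indices. Objective: idiomatic.

-- ===== PORT A =====
-- `cad[n] in '01234567'`
def pvOctA (c : Char) : Bool :=
  c = '0' || c = '1' || c = '2' || c = '3' || c = '4' || c = '5' || c = '6' || c = '7'

-- the for-loop over range(len(cad)); `s`/`len` are the full string and its length,
-- the list argument is the suffix cad[n:].  `cad[0]` is read via headD: when that
-- branch runs, n = 1, so the string is nonempty and the default is never used.
def pvGoA (s : List Char) (len : Nat) : List Char → Nat → Int → Bool → Option Int
  | [], _, k, _ => some k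
  | c :: rest, n, k, dec =>
    if pvOctA c then pvGoA s len rest (n+1) (k+1) dec
    else if c = '.' ∧ dec = false ∧ n ≠ len - 1 ∧ n ≠ 0 then
      (if n = 1 ∧ (s.headD ' ' = '+' ∨ s.headD ' ' = '-') then none
       else pvGoA s len rest (n+1) k true)
    else if (c = '+' ∨ c = '-') ∧ n = 0 then pvGoA s len rest (n+1) k dec
    else none

def getNumberOfDigitsOctal (cad : String) : Option Int :=
  let s := cad.toList
  pvGoA s s.length s 0 0 false

-- ===== PORT B =====
-- `c in '01234567'`
def pvOctB (c : Char) : Bool :=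
  c = '0' || c = '1' || c = '2' || c = '3' || c = '4' || c = '5' || c = '6' || c = '7'

-- hand port of re.fullmatch(r'[+-]?(?:[0-7]+(?:\.[0-7]+)?)?', cad): strip an optional
-- sign, then the body is empty, or octal digits, or octal digits '.' octal digits.
-- Exact for this pattern (no backtracking is ever needed: [0-7] and '.' are disjoint).
def pvBody (l : List Char) : List Char :=
  match l with
  | c :: t => if c = '+' ∨ c = '-' then t else l
  | [] => l

def pvTail (rest : List Char) : Bool :=
  match rest with
  | [] => true
  | r :: es => r = '.' && !es.isEmpty && es.all pvOctB

def pvFullmatchOctal (l : List Char) : Bool :=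
  let b := pvBody l
  b.isEmpty || (!(b.takeWhile pvOctB).isEmpty && pvTail (b.dropWhile pvOctB))

def getNumberOfDigitsOctal_alt (cad : String) : Option Int :=
  let s := cad.toList
  if pvFullmatchOctal s then
    some (s.foldl (fun k c => if pvOctB c then k + 1 else k) 0)
  else none

-- ===== PRECONDITION & SPEC =====
def Spec_getNumberOfDigitsOctal (cad : String) (out : Option Int) : Prop := out = getNumberOfDigitsOctal_alt cad
instance (cad : String) (out : Option Int) : Decidable (Spec_getNumberOfDigitsOctal cad out) := by unfold Spec_getNumberOfDigitsOctal; infer_instance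

-- ===== CLAIM (what is proved, stated in full; the proofs are below) =====
def Claim_equal_getNumberOfDigitsOctal : Prop := ∀ (cad : String), Dom_getNumberOfDigitsOctal cad → Spec_getNumberOfDigitsOctal cad (getNumberOfDigitsOctal cad)

-- ===== LEMMAS AND PROOFS =====

theorem oct_eq : pvOctA = pvOctB := rfl

-- the head of dropWhile fails the predicate
theorem dropWhile_head_false {α : Type} (p : α → Bool) :
    ∀ (l : List α) (r : α) (es : List α), l.dropWhile p = r :: es → p r = false := by
  intro l
  induction l with
  | nil => intro r es h; simp at h
  | cons c t ih =>
    intro r es h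
    by_cases hc : p c = true
    · rw [List.dropWhile_cons_of_pos hc] at h; exact ih r es h
    · rw [List.dropWhile_cons_of_neg hc] at h
      cases h; simpa using hc

-- the digit-counting fold equals k0 + countP
theorem foldl_count (l : List Char) (k0 : Int) :
    l.foldl (fun k c => if pvOctB c then k + 1 else k) k0 = k0 + (l.countP pvOctB : Int) := by
  induction l generalizing k0 with
  | nil => simp
  | cons c t ih =>
    by_cases h : pvOctB c = true <;>
      simp [List.foldl, h, ih, List.countP_cons] <;> push_cast <;> ring

-- skipping a run of octal digits
theorem goA_digits (s : List Char) (len : Nat) (ds rest : List Char) (n : Nat) (k : Int) (dec : Bool)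
    (h : ds.all pvOctA = true) :
    pvGoA s len (ds ++ rest) n k dec = pvGoA s len rest (n + ds.length) (k + ds.length) dec := by
  induction ds generalizing n k with
  | nil => simp
  | cons c t ih =>
    simp only [List.all_cons, Bool.and_eq_true] at h
    simp only [List.cons_append, pvGoA, h.1, if_pos, List.length_cons]
    rw [ih _ _ h.2]
    congr 1
    · omega
    · push_cast; ring

-- once decimal is True, any remaining non-octal char kills the loop
theorem goA_true_bad (s : List Char) (len : Nat) (rest : List Char) (n : Nat) (k : Int)
    (hn : n ≠ 0) (h : rest.all pvOctA = false) :
    pvGoA s len rest n k true = none := by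
  induction rest generalizing n k with
  | nil => simp at h
  | cons c t ih =>
    simp only [List.all_cons, Bool.and_eq_false_iff] at h
    by_cases hc : pvOctA c = true
    · rcases h with h | h
      · simp [hc] at h
      · simp only [pvGoA, hc, if_pos]
        exact ih _ _ (by omega) h
    · have h1 : ¬ (c = '.' ∧ true = false ∧ n ≠ len - 1 ∧ n ≠ 0) := by simp
      have h2 : ¬ ((c = '+' ∨ c = '-') ∧ n = 0) := by rintro ⟨-, h0⟩; exact hn h0
      simp only [pvGoA]
      rw [if_neg hc, if_neg h1, if_neg h2]

theorem goA_nil (s : List Char) (len : Nat) (n : Nat) (k : Int) (dec : Bool) :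
    pvGoA s len [] n k dec = some k := rfl

-- an all-octal run counts its own length
theorem countP_all_oct (l : List Char) (h : l.all pvOctB = true) : l.countP pvOctB = l.length := by
  rw [List.countP_eq_length]; intro a ha; exact (List.all_eq_true.mp h) a ha

-- main lemma on the body: starting after an optional sign (n0 = 0 or 1), A's loop on the
-- body agrees with B's grammar check + count
theorem goA_body (s : List Char) (bs : List Char) (n0 : Nat)
    (hs : s = (s.take n0) ++ bs) (hlen : s.length = n0 + bs.length)
    (hsig : (n0 = 0 ∧ (∀ c, bs.head? = some c → ¬(c = '+' ∨ c = '-'))) ∨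
            (n0 = 1 ∧ (s.headD ' ' = '+' ∨ s.headD ' ' = '-'))) :
    pvGoA s s.length bs n0 0 false =
      (if (bs.isEmpty || (!(bs.takeWhile pvOctB).isEmpty && pvTail (bs.dropWhile pvOctB))) = true
       then some (bs.countP pvOctB : Int) else none) := by
  have hsplit : bs = bs.takeWhile pvOctB ++ bs.dropWhile pvOctB := (List.takeWhile_append_dropWhile).symm
  set ds := bs.takeWhile pvOctB with hds
  set rest := bs.dropWhile pvOctB with hrest
  have hdsall : ds.all pvOctA = true := by
    rw [List.all_eq_true]; intro a ha; exact List.mem_takeWhile_imp ha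
  have hstep : pvGoA s s.length bs n0 0 false
      = pvGoA s s.length rest (n0 + ds.length) ((0:Int) + ds.length) false := by
    conv_lhs => rw [hsplit]
    exact goA_digits _ _ _ _ _ _ _ hdsall
  have hcount : bs.countP pvOctB = ds.length + rest.countP pvOctB := by
    conv_lhs => rw [hsplit]
    rw [List.countP_append, countP_all_oct ds hdsall]
  match hr : rest with
  | [] =>
    -- body is all octal digits (possibly empty)
    rw [hstep, goA_nil]
    have hcnt : bs.countP pvOctB = ds.length := by simpa using hcount
    have hvalid : (bs.isEmpty || (!ds.isEmpty && pvTail ([] : List Char))) = true := by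
      by_cases hb : bs = []
      · simp [hb]
      · have : ds ≠ [] := by
          intro h0; rw [h0] at hsplit; simp at hsplit; exact hb hsplit
        simp [pvTail, this]
    rw [hvalid, if_pos rfl, hcnt]
    simp
  | r :: es =>
    have hrnot : pvOctB r = false := dropWhile_head_false pvOctB bs r es hrest.symm
    have hrnotA : pvOctA r = false := oct_eq ▸ hrnot
    by_cases hdse : ds = []
    · -- body starts with a non-octal char: r is bs.head
      have hbs : bs = r :: es := by rw [hsplit, hdse]; rfl
      have hnone : pvGoA s s.length (r :: es) (n0 + ds.length) ((0:Int) + ds.length) false = none := by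
        rw [hdse]
        simp only [List.length_nil, Nat.add_zero]
        by_cases hdot : r = '.'
        · rcases hsig with ⟨h0, hns⟩ | ⟨h1, hsgn⟩
          · -- n0 = 0: dot at position 0 rejected
            subst h0
            simp only [pvGoA]
            rw [if_neg (by simp [hrnotA]),
                if_neg (by rintro ⟨-, -, -, h⟩; exact h rfl),
                if_neg (by rintro ⟨hc, -⟩; exact (hns r (by rw [hbs]; rfl)) hc)]
          · -- n0 = 1, signed: dot at position 1
            subst h1
            by_cases hlast : (1 : Nat) = s.length - 1
            · simp only [pvGoA]
              rw [if_neg (by simp [hrnotA]),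
                  if_neg (by rintro ⟨-, -, h, -⟩; exact h hlast),
                  if_neg (by rintro ⟨hc, h0⟩; omega)]
            · simp only [pvGoA]
              rw [if_neg (by simp [hrnotA]), if_pos ⟨hdot, by trivial, hlast, by omega⟩,
                  if_pos ⟨by trivial, hsgn⟩]
        · -- non-octal, non-dot head of body
          rcases hsig with ⟨h0, hns⟩ | ⟨h1, hsgn⟩
          · subst h0
            simp only [pvGoA]
            rw [if_neg (by simp [hrnotA]),
                if_neg (by rintro ⟨hc, -⟩; exact hdot hc),
                if_neg (by rintro ⟨hc, -⟩; exact (hns r (by rw [hbs]; rfl)) hc)]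
          · subst h1
            simp only [pvGoA]
            rw [if_neg (by simp [hrnotA]),
                if_neg (by rintro ⟨hc, -⟩; exact hdot hc),
                if_neg (by rintro ⟨-, h0⟩; omega)]
      rw [hstep, hnone]
      have hv : (bs.isEmpty || (!ds.isEmpty && pvTail (r :: es))) = false := by
        simp [hbs, hdse]
      rw [hv, if_neg (by simp)]
    · -- ds nonempty: digits, then r
      have hdslen : 0 < ds.length := List.length_pos_iff.mpr hdse
      by_cases hdot : r = '.'
      · by_cases hese : es = []
        · -- trailing dot: position = len - 1
          have hlast : n0 + ds.length = s.length - 1 := by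
            have hbl : bs.length = ds.length + 1 := by rw [hsplit, hese]; simp
            omega
          have hnone : pvGoA s s.length (r :: es) (n0 + ds.length) ((0:Int) + ds.length) false = none := by
            rw [hese]
            simp only [pvGoA]
            rw [if_neg (by simp [hrnotA]),
                if_neg (by rintro ⟨-, -, h, -⟩; exact h hlast),
                if_neg (by rintro ⟨hc, -⟩; rcases hc with hc | hc <;> rw [hc] at hdot <;> simp at hdot)]
          rw [hstep, hnone]
          have hv : (bs.isEmpty || (!ds.isEmpty && pvTail (r :: es))) = false := by
            simp [pvTail, hdot, hese, hsplit]
          rw [hv, if_neg (by simp)]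
        · -- dot with a nonempty tail: the dot is accepted (position ≥ 1, < len-1; position 1
          -- with a sign is impossible since ds ≠ [])
          have hlast : n0 + ds.length ≠ s.length - 1 := by
            have hbl : bs.length = ds.length + 1 + es.length := by rw [hsplit]; simp; omega
            have hel : 0 < es.length := List.length_pos_iff.mpr hese
            omega
          have hnsig : ¬ (n0 + ds.length = 1 ∧ (s.headD ' ' = '+' ∨ s.headD ' ' = '-')) := by
            rintro ⟨heq, hsgn⟩
            rcases hsig with ⟨h0, -⟩ | ⟨h1, -⟩
            · subst h0
              have hds1 : ds.length = 1 := by omega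
              -- s.headD ' ' is then ds.head, an octal digit, contradicting the sign
              match hd : ds with
              | [d] =>
                have hdo : pvOctA d = true := by simpa using hdsall
                have hsbs : s = bs := by simpa using hs
                have hshead : s.headD ' ' = d := by rw [hsbs, hsplit]; rfl
                rw [hshead] at hsgn
                rcases hsgn with h | h <;> rw [h] at hdo <;> simp [pvOctA] at hdo
              | [] => simp at hds1
              | _ :: _ :: _ => exact hdse (by simp at hds1)
            · omega
          have hstep2 : pvGoA s s.length (r :: es) (n0 + ds.length) ((0:Int) + ds.length) false
              = pvGoA s s.length es (n0 + ds.length + 1) ((0:Int) + ds.length) true := by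
            simp only [pvGoA]
            rw [if_neg (by simp [hrnotA]), if_pos ⟨hdot, by trivial, hlast, by omega⟩, if_neg hnsig]
          by_cases hesall : es.all pvOctA = true
          · have hrun : pvGoA s s.length es (n0 + ds.length + 1) ((0:Int) + ds.length) true
                = some (((0:Int) + ds.length) + es.length) := by
              have := goA_digits s s.length es [] (n0 + ds.length + 1) ((0:Int) + ds.length) true hesall
              simpa [goA_nil] using this
            rw [hstep, hstep2, hrun]
            have hvalid : (bs.isEmpty || (!ds.isEmpty && pvTail (r :: es))) = true := by
              simp [pvTail, hdot, hdse, hese, oct_eq ▸ hesall]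
            rw [hvalid, if_pos rfl]
            have hrc : (r :: es).countP pvOctB = es.length := by
              rw [List.countP_cons, countP_all_oct es (oct_eq ▸ hesall)]
              simp [hrnot]
            rw [hcount, hrc]
            push_cast; ring_nf
          · have hdead : pvGoA s s.length es (n0 + ds.length + 1) ((0:Int) + ds.length) true = none :=
              goA_true_bad s s.length es _ _ (by omega) (by simpa using hesall)
            rw [hstep, hstep2, hdead]
            have hv : (bs.isEmpty || (!ds.isEmpty && pvTail (r :: es))) = false := by
              have hesf : es.all pvOctB = false := by rw [← oct_eq]; simpa using hesall
              simp [pvTail, hdot, hese, hesf, hsplit]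
            rw [hv, if_neg (by simp)]
      · -- non-octal, non-dot char after the digits: reject (position ≥ 1, so no sign branch)
        have hnone : pvGoA s s.length (r :: es) (n0 + ds.length) ((0:Int) + ds.length) false = none := by
          simp only [pvGoA]
          rw [if_neg (by simp [hrnotA]),
              if_neg (by rintro ⟨hc, -⟩; exact hdot hc),
              if_neg (by rintro ⟨-, h0⟩; omega)]
        rw [hstep, hnone]
        have hv : (bs.isEmpty || (!ds.isEmpty && pvTail (r :: es))) = false := by
          simp [pvTail, hdot, hsplit]
        rw [hv, if_neg (by simp)]

-- the whole string: peel the optional sign, then goA_body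
theorem pvMain (s : List Char) :
    pvGoA s s.length s 0 0 false =
      (if pvFullmatchOctal s = true then some ((s.countP pvOctB : Int)) else none) := by
  match s with
  | [] => rfl
  | c :: t =>
    by_cases hsgn : c = '+' ∨ c = '-'
    · have hco : pvOctA c = false := by rcases hsgn with h | h <;> rw [h] <;> rfl
      have hstep : pvGoA (c :: t) (c :: t).length (c :: t) 0 0 false
          = pvGoA (c :: t) (c :: t).length t 1 0 false := by
        simp only [pvGoA]
        rw [if_neg (by simp [hco]), if_neg (by rintro ⟨-, -, -, h⟩; exact h rfl),
            if_pos ⟨hsgn, by trivial⟩]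
      have hb := goA_body (c :: t) t 1 (by rfl) (by simp [Nat.add_comm]) (Or.inr ⟨rfl, by simpa using hsgn⟩)
      rw [hstep, hb]
      have hcc : pvOctB c = false := oct_eq ▸ hco
      simp only [pvFullmatchOctal, pvBody, if_pos hsgn, List.countP_cons, hcc]
      simp
    · have hb := goA_body (c :: t) (c :: t) 0 (by rfl) (by simp)
        (Or.inl ⟨rfl, by intro x hx; simp at hx; rw [← hx]; exact hsgn⟩)
      rw [hb]
      simp only [pvFullmatchOctal, pvBody, if_neg hsgn]

-- ===== VERDICT (by name: the statement is the Claim_ definition above) =====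
theorem getNumberOfDigitsOctal_spec : Claim_equal_getNumberOfDigitsOctal := by
  intro cad _
  show pvGoA cad.toList cad.toList.length cad.toList 0 0 false =
    (if pvFullmatchOctal cad.toList then
      some (cad.toList.foldl (fun k c => if pvOctB c then k + 1 else k) 0)
     else none)
  rw [pvMain, foldl_count]
  simp
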